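-- pv_equiv track=rewrite | github.com/svend4/meta | libs/hexcore/hexcore.py | bfs_from
-- ===== SOURCE A (Python) =====
-- from collections import deque
--
-- LINES = 6          # число черт в гексаграмме
--
-- def neighbors(h: int) -> list[int]:
--     """Все 6 гексаграмм, достижимых за один шаг (переворот одной черты)."""
--     return [h ^ (1 << i) for i in range(LINES)]
--
-- def bfs_from(start: int) -> dict[int, int]:
--     """BFS-расстояния от start до всех остальных гексаграмм."""
--     dist: dict[int, int] = {start: 0}
--     queue: deque[int] = deque([start])
--     while queue:
--         current = queue.popleft()
--         for nb in neighbors(current):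
--             if nb not in dist:
--                 dist[nb] = dist[current] + 1
--                 queue.append(nb)
--     return dist
-- ===== SOURCE B (Python) =====
-- LINES = 6
--
--
-- def _combos(lo: int, k: int) -> list[int]:
--     """All masks with k set bits chosen from bit positions lo..LINES-1,
--     in lexicographic order of the ascending bit-position tuples."""
--     if k == 0:
--         return [0]
--     out = []
--     for b in range(lo, LINES):
--         for rest in _combos(b + 1, k - 1):
--             out.append((1 << b) | rest)
--     return out
--
--
-- def bfs_from(start: int) -> dict[int, int]:
--     """Distances from start: flipping the bits of mask costs popcount(mask) = k,
--     so emit the k-bit masks layer by layer -- no queue, no visited set."""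
--     dist: dict[int, int] = {}
--     for k in range(LINES + 1):
--         for mask in _combos(0, k):
--             dist[start ^ mask] = k
--     return dist
-- ===== Notes on version B (the rewrite author's own statement) =====
-- stated objective: alternative
-- what changed: Replaces the BFS queue/visited-dict traversal by a direct Hamming-distance formula: for each k the k-bit masks are generated combinatorially and dist[start ^ mask] = k, with no queue and no membership tests.
import Mathlib
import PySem

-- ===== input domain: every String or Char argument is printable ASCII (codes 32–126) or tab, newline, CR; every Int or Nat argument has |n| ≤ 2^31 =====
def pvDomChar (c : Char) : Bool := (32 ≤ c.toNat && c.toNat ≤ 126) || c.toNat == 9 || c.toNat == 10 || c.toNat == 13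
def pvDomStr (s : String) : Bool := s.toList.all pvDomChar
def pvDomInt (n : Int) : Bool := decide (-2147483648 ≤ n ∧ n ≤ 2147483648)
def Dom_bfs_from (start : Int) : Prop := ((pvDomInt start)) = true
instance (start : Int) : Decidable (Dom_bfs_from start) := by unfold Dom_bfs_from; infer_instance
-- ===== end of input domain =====

-- B replaces A's BFS queue/visited-dict by a direct Hamming-distance enumeration
-- (layer k inserts every k-bit mask as start ^ mask); same dict, no queue, no lookups.

-- ===== PORT A =====
def pyLINES : Int := 6          -- LINES = 6

-- neighbors(h) = [h ^ (1 << i) for i in range(LINES)]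
-- (i ranges over 0..5, so i.toNat is exact for Python's 1 << i)
def neighbors (h : Int) : List Int :=
  (PySem.List.pyRange 0 pyLINES 1).map (fun i => PySem.Int.bxor h ((1 : Int) <<< i.toNat))

-- the body of one while-iteration: the 'for nb in neighbors(current)' loop.
-- dist[current] is read from the evolving dict via getD (current is always a key,
-- so Python's dist[current] never raises and getD _ 0 is exact).
def bfsVisit (dist : PySem.Dict Int Int) (queue : List Int) (current : Int) :
    PySem.Dict Int Int × List Int :=
  (neighbors current).foldl
    (fun s nb =>
      if s.1.contains nb = false then
        (s.1.insert nb (s.1.getD current 0 + 1), s.2 ++ [nb])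
      else s)
    (dist, queue)

-- 'while queue:' as fuel recursion; each pop appends at most 6 new keys and at most
-- 385 = 1 + 6 * 64 elements can ever be appended, so fuel 385 never runs out and the
-- recursion computes exactly Python's while loop.
def bfsLoop : Nat → PySem.Dict Int Int → List Int → PySem.Dict Int Int
  | 0, dist, _ => dist
  | _ + 1, dist, [] => dist
  | fuel + 1, dist, current :: queue =>
    let s := bfsVisit dist queue current
    bfsLoop fuel s.1 s.2

def bfs_from (start : Int) : List (Int × Int) :=
  (bfsLoop 385 (PySem.Dict.empty.insert start 0) [start]).items

-- ===== PORT B =====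
-- _combos(lo, k); the recursion on k is ported through k.toNat — exact for the
-- calls bfs_from_alt makes (k in range(7)); the inner 'for rest: out.append(...)'
-- is the loop shape 'out ++ (…).map …'.
def combosAux : Nat → Int → List Int
  | 0, _ => [0]
  | k + 1, lo =>
    (PySem.List.pyRange lo pyLINES 1).foldl
      (fun out b =>
        out ++ (combosAux k (b + 1)).map
          (fun rest => PySem.Int.bor ((1 : Int) <<< b.toNat) rest))
      []

def combos (lo k : Int) : List Int := combosAux k.toNat lo

def bfs_from_alt (start : Int) : List (Int × Int) :=
  ((PySem.List.pyRange 0 (pyLINES + 1) 1).foldl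
      (fun dist k =>
        (combos 0 k).foldl
          (fun (d : PySem.Dict Int Int) mask => d.insert (PySem.Int.bxor start mask) k)
          dist)
      PySem.Dict.empty).items

-- ===== PRECONDITION & SPEC =====
def Spec_bfs_from (start : Int) (out : List (Int × Int)) : Prop := out = bfs_from_alt start
instance (start : Int) (out : List (Int × Int)) : Decidable (Spec_bfs_from start out) := by unfold Spec_bfs_from; infer_instance

-- ===== CLAIM (what is proved, stated in full; the proofs are below) =====
def Claim_equal_bfs_from : Prop := ∀ (start : Int), Dom_bfs_from start → Spec_bfs_from start (bfs_from start)

-- ===== LEMMAS AND PROOFS =====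

-- bxor on the two Int constructors (Python-exact two's-complement xor)
theorem pvBxor_ofNat_ofNat (m n : Nat) :
    PySem.Int.bxor (Int.ofNat m) (Int.ofNat n) = Int.ofNat (m ^^^ n) := by
  simp [PySem.Int.bxor]

theorem pvBxor_negSucc_ofNat (m n : Nat) :
    PySem.Int.bxor (Int.negSucc m) (Int.ofNat n) = Int.negSucc (m ^^^ n) := by
  simp [PySem.Int.bxor, Int.negSucc_eq]; omega

theorem pvBxor_ofNat_negSucc (m n : Nat) :
    PySem.Int.bxor (Int.ofNat m) (Int.negSucc n) = Int.negSucc (m ^^^ n) := by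
  simp [PySem.Int.bxor, Int.negSucc_eq]; omega

theorem pvBxor_negSucc_negSucc (m n : Nat) :
    PySem.Int.bxor (Int.negSucc m) (Int.negSucc n) = Int.ofNat (m ^^^ n) := by
  simp [PySem.Int.bxor, Int.negSucc_eq]; omega

theorem pvBxor_assoc (a b c : Int) :
    PySem.Int.bxor (PySem.Int.bxor a b) c = PySem.Int.bxor a (PySem.Int.bxor b c) := by
  rcases a with m | m <;> rcases b with n | n <;> rcases c with p | p <;>
    simp only [pvBxor_ofNat_ofNat, pvBxor_ofNat_negSucc, pvBxor_negSucc_ofNat,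
      pvBxor_negSucc_negSucc, Nat.xor_assoc]

theorem pvBxor_zero_left (a : Int) : PySem.Int.bxor 0 a = a := by
  rw [PySem.Int.bxor_comm, PySem.Int.bxor_zero]

theorem pvBxor_cancel (s a : Int) : PySem.Int.bxor s (PySem.Int.bxor s a) = a := by
  rw [← pvBxor_assoc, PySem.Int.bxor_self, pvBxor_zero_left]

theorem pvBeq_bxor (s a b : Int) :
    (PySem.Int.bxor s a == PySem.Int.bxor s b) = (a == b) := by
  by_cases h : a = b
  · simp [h]
  · have hne : PySem.Int.bxor s a ≠ PySem.Int.bxor s b := fun hc => h (by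
      have h2 := congrArg (PySem.Int.bxor s) hc
      rwa [pvBxor_cancel, pvBxor_cancel] at h2)
    rw [beq_eq_false_iff_ne.mpr h]
    exact beq_eq_false_iff_ne.mpr hne

-- xor-translation of a dict (key map k ↦ s ^ k) and how the dict primitives commute with it
def pvMapD (s : Int) (d : PySem.Dict Int Int) : PySem.Dict Int Int :=
  PySem.Dict.mk (d.items.map (fun p => (PySem.Int.bxor s p.1, p.2)))

theorem pvMapD_get? (s : Int) (d : PySem.Dict Int Int) (k : Int) :
    (pvMapD s d).get? (PySem.Int.bxor s k) = d.get? k := by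
  simp [pvMapD, PySem.Dict.get?, List.find?_map, Function.comp_def, pvBeq_bxor,
    Option.map_map]

theorem pvMapD_contains (s : Int) (d : PySem.Dict Int Int) (k : Int) :
    (pvMapD s d).contains (PySem.Int.bxor s k) = d.contains k := by
  simp [pvMapD, PySem.Dict.contains, List.any_map, Function.comp_def, pvBeq_bxor]

theorem pvMapD_getD (s : Int) (d : PySem.Dict Int Int) (k d0 : Int) :
    (pvMapD s d).getD (PySem.Int.bxor s k) d0 = d.getD k d0 := by
  simp [PySem.Dict.getD, pvMapD_get?]

theorem pvMapD_insert (s : Int) (d : PySem.Dict Int Int) (k v : Int) :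
    (pvMapD s d).insert (PySem.Int.bxor s k) v = pvMapD s (d.insert k v) := by
  simp only [PySem.Dict.insert, pvMapD_contains]
  by_cases h : d.contains k <;> simp only [h, if_true]
  · apply PySem.Dict.ext
    simp only [pvMapD, List.map_map]
    apply List.map_congr_left
    intro p _
    simp only [Function.comp_apply, pvBeq_bxor]
    by_cases hk : (p.1 == k) = true <;> simp [hk]
  · apply PySem.Dict.ext
    simp [pvMapD]

theorem pvNeighbors_bxor (s c : Int) :
    neighbors (PySem.Int.bxor s c) = (neighbors c).map (PySem.Int.bxor s) := by
  simp only [neighbors, List.map_map]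
  apply List.map_congr_left
  intro i _
  simp [Function.comp_apply, pvBxor_assoc]

theorem pvVisitAux (s c : Int) (nbs : List Int) :
    ∀ (d : PySem.Dict Int Int) (q : List Int),
    nbs.foldl
        (fun t nb =>
          if t.1.contains (PySem.Int.bxor s nb) = false then
            (t.1.insert (PySem.Int.bxor s nb) (t.1.getD (PySem.Int.bxor s c) 0 + 1),
             t.2 ++ [PySem.Int.bxor s nb])
          else t)
        (pvMapD s d, q.map (PySem.Int.bxor s))
      = (pvMapD s (nbs.foldl
            (fun t nb =>
              if t.1.contains nb = false then
                (t.1.insert nb (t.1.getD c 0 + 1), t.2 ++ [nb])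
              else t) (d, q)).1,
         (nbs.foldl
            (fun t nb =>
              if t.1.contains nb = false then
                (t.1.insert nb (t.1.getD c 0 + 1), t.2 ++ [nb])
              else t) (d, q)).2.map (PySem.Int.bxor s)) := by
  induction nbs with
  | nil => intro d q; rfl
  | cons nb rest ih =>
    intro d q
    simp only [List.foldl_cons, pvMapD_contains]
    by_cases h : d.contains nb = false
    · simp only [h, if_true, pvMapD_getD, pvMapD_insert]
      have hq : (q.map (PySem.Int.bxor s)) ++ [PySem.Int.bxor s nb]
          = (q ++ [nb]).map (PySem.Int.bxor s) := by simp
      rw [hq]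
      exact ih _ _
    · simp only [h]
      exact ih _ _

theorem pvVisit_bxor (s : Int) (d : PySem.Dict Int Int) (q : List Int) (c : Int) :
    bfsVisit (pvMapD s d) (q.map (PySem.Int.bxor s)) (PySem.Int.bxor s c)
      = (pvMapD s (bfsVisit d q c).1, (bfsVisit d q c).2.map (PySem.Int.bxor s)) := by
  unfold bfsVisit
  rw [pvNeighbors_bxor, List.foldl_map]
  exact pvVisitAux s c (neighbors c) d q

theorem pvLoop_bxor (s : Int) (fuel : Nat) :
    ∀ (d : PySem.Dict Int Int) (q : List Int),
    bfsLoop fuel (pvMapD s d) (q.map (PySem.Int.bxor s)) = pvMapD s (bfsLoop fuel d q) := by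
  induction fuel with
  | zero => intro d q; rfl
  | succ fuel ih =>
    intro d q
    cases q with
    | nil => rfl
    | cons c rest =>
      simp only [List.map_cons, bfsLoop]
      rw [pvVisit_bxor]
      exact ih _ _

theorem pvA_shift (s : Int) :
    bfs_from s = (bfs_from 0).map (fun p => (PySem.Int.bxor s p.1, p.2)) := by
  have h1 : PySem.Dict.empty.insert s 0 = pvMapD s (PySem.Dict.empty.insert 0 0) := by
    apply PySem.Dict.ext
    simp [pvMapD, PySem.Dict.insert, PySem.Dict.contains, PySem.Dict.empty,
      PySem.Int.bxor_zero]
  have h2 : [s] = [0].map (PySem.Int.bxor s) := by simp [PySem.Int.bxor_zero]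
  unfold bfs_from
  rw [h1, h2, pvLoop_bxor]
  rfl

theorem pvAltInner_bxor (s k : Int) (masks : List Int) :
    ∀ (d : PySem.Dict Int Int),
    masks.foldl (fun d m => d.insert (PySem.Int.bxor s m) k) (pvMapD s d)
      = pvMapD s (masks.foldl (fun d m => d.insert (PySem.Int.bxor 0 m) k) d) := by
  induction masks with
  | nil => intro d; rfl
  | cons m rest ih =>
    intro d
    simp only [List.foldl_cons]
    have hk : PySem.Int.bxor s m = PySem.Int.bxor s (PySem.Int.bxor 0 m) := by
      rw [pvBxor_zero_left]
    rw [hk, pvMapD_insert]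
    exact ih _

theorem pvAltOuter_bxor (s : Int) (ks : List Int) :
    ∀ (d : PySem.Dict Int Int),
    ks.foldl (fun dist k => (combos 0 k).foldl
        (fun (d : PySem.Dict Int Int) mask => d.insert (PySem.Int.bxor s mask) k) dist)
      (pvMapD s d)
      = pvMapD s (ks.foldl (fun dist k => (combos 0 k).foldl
          (fun (d : PySem.Dict Int Int) mask => d.insert (PySem.Int.bxor 0 mask) k) dist) d) := by
  induction ks with
  | nil => intro d; rfl
  | cons k rest ih =>
    intro d
    simp only [List.foldl_cons]
    rw [pvAltInner_bxor]
    exact ih _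

theorem pvB_shift (s : Int) :
    bfs_from_alt s = (bfs_from_alt 0).map (fun p => (PySem.Int.bxor s p.1, p.2)) := by
  have h0 : (PySem.Dict.empty : PySem.Dict Int Int) = pvMapD s PySem.Dict.empty := rfl
  unfold bfs_from_alt
  conv_lhs => rw [h0]
  rw [pvAltOuter_bxor]
  simp only [pvMapD]

set_option maxRecDepth 40000 in
set_option maxHeartbeats 2000000 in
theorem pvBase : bfs_from 0 = bfs_from_alt 0 := by decide

-- ===== VERDICT (by name: the statement is the Claim_ definition above) =====
theorem bfs_from_spec : Claim_equal_bfs_from := by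
  intro start _
  show bfs_from start = bfs_from_alt start
  rw [pvA_shift, pvBase, ← pvB_shift]
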